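-- pv_equiv track=rewrite | github.com/NorbertT83/python_exam | main.py | get_riddle
-- ===== SOURCE A (Python) =====
-- def get_riddle(puzzle, tippek):
--     riddle = ""
--     for c in puzzle:
--         if c in tippek or c in " -":
--             riddle += c
--         else:
--             riddle += "_"
--     return riddle
-- ===== SOURCE B (Python) =====
-- def get_riddle(puzzle, tippek):
--     allowed = set(tippek) | {' ', '-'}
--     table = {ord(c): (c if c in allowed else '_') for c in set(puzzle)}
--     return puzzle.translate(table)
-- ===== Notes on version B (the rewrite author's own statement) =====
-- stated objective: faster
-- what changed: Builds the allowed set and a char->output translation table over the distinct characters of puzzle once, then applies it with a single str.translate pass, instead of a per-position membership branch accumulating the string with +=.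
import Mathlib
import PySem

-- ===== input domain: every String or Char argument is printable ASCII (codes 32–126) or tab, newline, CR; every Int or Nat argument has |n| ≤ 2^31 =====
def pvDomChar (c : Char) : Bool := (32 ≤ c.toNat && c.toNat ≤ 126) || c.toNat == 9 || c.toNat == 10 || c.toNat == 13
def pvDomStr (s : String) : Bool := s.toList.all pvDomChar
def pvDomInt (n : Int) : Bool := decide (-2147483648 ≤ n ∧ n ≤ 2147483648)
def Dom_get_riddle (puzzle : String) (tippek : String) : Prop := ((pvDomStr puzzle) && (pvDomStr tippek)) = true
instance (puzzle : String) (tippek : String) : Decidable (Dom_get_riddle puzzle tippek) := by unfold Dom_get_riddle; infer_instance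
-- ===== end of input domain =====

-- B builds the allowed set and a per-distinct-character translation table, then maps it over
-- the puzzle in one translate pass (idiomatic), instead of A's per-position membership branch.


-- ===== PORT A =====
def get_riddle (puzzle : String) (tippek : String) : String :=
  String.mk (puzzle.toList.foldl
    (fun riddle c =>
      if tippek.toList.contains c || (" -".toList).contains c then riddle ++ [c]
      else riddle ++ ['_'])
    [])

-- ===== PORT B =====
def get_riddle_alt (puzzle : String) (tippek : String) : String :=
  let allowed : PySem.Set Char := ((PySem.Set.ofList tippek.toList).add ' ').add '-'
  let table : PySem.Dict Char Char :=
    (PySem.Set.ofList puzzle.toList).foldl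
      (fun d c => d.insert c (if allowed.contains c then c else '_')) PySem.Dict.empty
  String.mk (puzzle.toList.map (fun c => table.getD c c))

-- ===== PRECONDITION & SPEC =====
def Spec_get_riddle (puzzle : String) (tippek : String) (out : String) : Prop := out = get_riddle_alt puzzle tippek
instance (puzzle : String) (tippek : String) (out : String) : Decidable (Spec_get_riddle puzzle tippek out) := by unfold Spec_get_riddle; infer_instance

-- ===== CLAIM (what is proved, stated in full; the proofs are below) =====
def Claim_equal_get_riddle : Prop := ∀ (puzzle : String) (tippek : String), Dom_get_riddle puzzle tippek → Spec_get_riddle puzzle tippek (get_riddle puzzle tippek)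

-- ===== LEMMAS AND PROOFS =====

-- Looking a key up in a dict built by inserting f c for each c of l.
theorem getD_foldl_insert_fn (l : List Char) (d : PySem.Dict Char Char) (f : Char → Char)
    (k dflt : Char) :
    (l.foldl (fun d c => d.insert c (f c)) d).getD k dflt
      = if k ∈ l then f k else d.getD k dflt := by
  induction l generalizing d with
  | nil => simp
  | cons c cs ih =>
    simp only [List.foldl_cons, ih, PySem.Dict.getD_insert, List.mem_cons]
    by_cases hk : k = c <;> by_cases hm : k ∈ cs <;> simp [hk, hm]

theorem get_riddle_spec : Claim_equal_get_riddle := by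
  intro puzzle tippek _
  unfold Spec_get_riddle get_riddle get_riddle_alt
  simp only []
  congr 1
  have hbranch :
      puzzle.toList.foldl
        (fun riddle c =>
          if tippek.toList.contains c || (" -".toList).contains c then riddle ++ [c]
          else riddle ++ ['_']) []
      = puzzle.toList.foldl
        (fun riddle c =>
          riddle ++ [if tippek.toList.contains c || (" -".toList).contains c then c else '_']) [] := by
    apply PySem.List.foldl_congr_mem
    intro acc c _
    split_ifs <;> rfl
  rw [hbranch, PySem.List.foldl_append_singleton_eq_map, List.nil_append]
  apply List.map_congr_left
  intro c hc
  rw [getD_foldl_insert_fn]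
  have hp : c ∈ PySem.Set.ofList puzzle.toList := (PySem.Set.mem_ofList _ _).mpr hc
  simp only [hp, if_true]
  have hcont : (((PySem.Set.ofList tippek.toList).add ' ').add '-').contains c
      = (tippek.toList.contains c || (" -".toList).contains c) := by
    rw [Bool.eq_iff_iff, PySem.Set.contains_iff]
    simp [PySem.Set.mem_add, PySem.Set.mem_ofList]
    tauto
  rw [hcont]

-- ===== VERDICT (by name: the statement is the Claim_ definition above) =====
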